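-- pv_equiv track=rewrite | github.com/miliar/Code_Jam_Webscraper | Solutions_python/Problem_203/395.py | main_func
-- ===== SOURCE A (Python) =====
-- def main_func(cake):
--     if not cake:
--         return ''
--
--     result = []
--     current_line = '?' * len(cake[0])
--     for l_id, line in enumerate(cake):
--         if any(e != '?' for e in line):
--             current_line = ''
--             i = 0
--             current_cell = '?'
--             while i < len(line):
--                 if line[i] != '?':
--                     current_cell = line[i]
--                     current_line += current_cell*(i+1-len(current_line))
--                 else:
--                     if current_cell != '?':
--                         current_line += current_cell
--                 i += 1
--             for k in range(l_id + 1 - len(result)):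
--                 result.append(current_line)
--         else:  # all ?
--             if any(e != '?' for e in current_line):
--                 result.append(current_line)
--     return '\n' + '\n'.join(result)
-- ===== SOURCE B (Python) =====
-- def _hfill(line):
--     """Horizontal fill of one row, or None if the row has no known cell."""
--     first = next((c for c in line if c != '?'), None)
--     if first is None:
--         return None
--     out = []
--     cur = first
--     for c in line:
--         if c != '?':
--             cur = c
--         out.append(cur)
--     return ''.join(out)
--
--
-- def main_func(cake):
--     if not cake:
--         return ''
--     filled = [_hfill(line) for line in cake]
--     fk = next((f for f in filled if f is not None), None)
--     if fk is None:
--         return '\n'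
--     rows = []
--     last = fk
--     for f in filled:
--         if f is not None:
--             last = f
--         rows.append(last)
--     return '\n' + '\n'.join(rows)
-- ===== Notes on version B (the rewrite author's own statement) =====
-- stated objective: simpler
-- what changed: Replaced A's single stateful loop (manual index/while fill with length-difference padding and a retroactive catch-up append) by two clean passes: map each row to its horizontal fill or None, then one scan carrying the last known fill, seeded with the first known fill so leading unknown rows inherit from below.
import Mathlib
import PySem

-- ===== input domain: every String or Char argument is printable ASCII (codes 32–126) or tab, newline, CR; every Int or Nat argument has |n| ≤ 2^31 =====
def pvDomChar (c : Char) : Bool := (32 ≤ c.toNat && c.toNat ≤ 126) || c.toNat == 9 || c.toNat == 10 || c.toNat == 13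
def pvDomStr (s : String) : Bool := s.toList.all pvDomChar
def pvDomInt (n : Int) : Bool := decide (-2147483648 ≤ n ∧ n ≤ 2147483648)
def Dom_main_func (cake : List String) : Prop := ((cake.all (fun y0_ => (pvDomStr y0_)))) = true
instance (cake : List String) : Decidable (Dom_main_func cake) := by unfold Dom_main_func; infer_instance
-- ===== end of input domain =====

-- B replaces A's stateful single loop (manual index/while fill, retroactive catch-up appends) by
-- two clean passes: per-row fill-or-None, then one carry scan; objective: simpler. Both are total.

-- ===== PORT A =====
-- A's inner while loop: state = (i, current_line, current_cell); Python strings as List Char (exact).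
-- 'current_cell*(i+1-len(current_line))': Python replication, negative count gives '' — Int.toNat matches exactly.
def aFillGo : List Char → Nat → List Char → Char → List Char
  | [], _, cl, _ => cl
  | c :: rest, i, cl, cc =>
      if c ≠ '?' then
        aFillGo rest (i + 1) (cl ++ List.replicate (((i : Int) + 1 - (cl.length : Int)).toNat) c) c
      else if cc ≠ '?' then aFillGo rest (i + 1) (cl ++ [cc]) cc
      else aFillGo rest (i + 1) cl cc

-- A's outer 'for l_id, line in enumerate(cake)' loop; 'for k in range(l_id+1-len(result)): append'
-- ported as appending that many copies (negative count = none, via Int.toNat, exact).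
def aLoop : List String → Nat → List (List Char) → List Char → List (List Char)
  | [], _, result, _ => result
  | line :: rest, l_id, result, current_line =>
      if line.toList.any (· ≠ '?') then
        aLoop rest (l_id + 1)
          (result ++ List.replicate (((l_id : Int) + 1 - (result.length : Int)).toNat)
            (aFillGo line.toList 0 [] '?'))
          (aFillGo line.toList 0 [] '?')
      else
        if current_line.any (· ≠ '?') then
          aLoop rest (l_id + 1) (result ++ [current_line]) current_line
        else aLoop rest (l_id + 1) result current_line

def main_func (cake : List String) : String :=
  if cake = [] then ""
  else
    "\n" ++ PySem.Str.join "\n"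
      ((aLoop cake 0 [] (List.replicate (cake.headD "").toList.length '?')).map String.mk)

-- ===== PORT B =====
-- Source B's _hfill: first known char (None if absent), then a left-to-right carry over the row.
def bFillGo : List Char → List Char → Char → List Char
  | [], out, _ => out
  | c :: rest, out, cur =>
      bFillGo rest (out ++ [if c ≠ '?' then c else cur]) (if c ≠ '?' then c else cur)

def bFill (line : List Char) : Option (List Char) :=
  match line.find? (· ≠ '?') with
  | none => none
  | some first => some (bFillGo line [] first)

-- Source B's second loop: carry the last known fill forward, seeded with the first known fill.
def bRowsGo : List (Option (List Char)) → List (List Char) → List Char → List (List Char)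
  | [], acc, _ => acc
  | f :: rest, acc, last =>
      match f with
      | some s => bRowsGo rest (acc ++ [s]) s
      | none => bRowsGo rest (acc ++ [last]) last

def main_func_alt (cake : List String) : String :=
  if cake = [] then ""
  else
    -- fk = next((f for f in filled if f is not None), None)
    match (((cake.map (fun l => bFill l.toList)).find? Option.isSome).bind id) with
    | none => "\n"
    | some fk =>
        "\n" ++ PySem.Str.join "\n"
          ((bRowsGo (cake.map (fun l => bFill l.toList)) [] fk).map String.mk)

-- ===== PRECONDITION & SPEC =====
def Spec_main_func (cake : List String) (out : String) : Prop := out = main_func_alt cake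
instance (cake : List String) (out : String) : Decidable (Spec_main_func cake out) := by unfold Spec_main_func; infer_instance

-- ===== CLAIM (what is proved, stated in full; the proofs are below) =====
def Claim_equal_main_func : Prop := ∀ (cake : List String), Dom_main_func cake → Spec_main_func cake (main_func cake)

-- ===== LEMMAS AND PROOFS =====

theorem bRowsGo_append (l : List (Option (List Char))) (acc : List (List Char)) (last : List Char) :
    bRowsGo l acc last = acc ++ bRowsGo l [] last := by
  induction l generalizing acc last with
  | nil => simp [bRowsGo]
  | cons f rest ih =>
      cases f with
      | some s =>
          show bRowsGo rest (acc ++ [s]) s = acc ++ bRowsGo rest ([] ++ [s]) s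
          rw [ih (acc ++ [s]), ih ([] ++ [s])]
          simp
      | none =>
          show bRowsGo rest (acc ++ [last]) last = acc ++ bRowsGo rest ([] ++ [last]) last
          rw [ih (acc ++ [last]), ih ([] ++ [last])]
          simp

-- A's inner loop agrees with Source B's carry loop once the first known cell has been seen.
theorem fill_phase2 (rest : List Char) : ∀ (i : Nat) (cl : List Char) (cc : Char),
    cc ≠ '?' → cl.length = i → aFillGo rest i cl cc = bFillGo rest cl cc := by
  induction rest with
  | nil => intro i cl cc _ _; rfl
  | cons c r ih =>
      intro i cl cc hcc hlen
      by_cases hc : c = '?'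
      · subst hc
        show (if ('?' : Char) ≠ '?' then _ else if cc ≠ '?' then aFillGo r (i+1) (cl ++ [cc]) cc else _)
            = bFillGo r (cl ++ [if ('?' : Char) ≠ '?' then '?' else cc]) (if ('?' : Char) ≠ '?' then '?' else cc)
        have hqq : ¬ (('?' : Char) ≠ '?') := fun h => h rfl
        rw [if_neg hqq, if_neg hqq, if_pos hcc]
        exact ih (i + 1) (cl ++ [cc]) cc hcc (by simp [hlen])
      · have h1 : ((i : Int) + 1 - (cl.length : Int)).toNat = 1 := by omega
        show (if c ≠ '?' then
              aFillGo r (i+1) (cl ++ List.replicate (((i : Int)+1 - (cl.length : Int)).toNat) c) c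
            else _)
            = bFillGo r (cl ++ [if c ≠ '?' then c else cc]) (if c ≠ '?' then c else cc)
        rw [if_pos hc, if_pos hc, h1, List.replicate_one]
        exact ih (i + 1) (cl ++ [c]) c hc (by simp [hlen])

-- A's inner loop through the leading '?'s vs Source B's fill started at the first known char.
theorem fill_pre (line : List Char) : ∀ (i : Nat) (first : Char),
    line.find? (· ≠ '?') = some first →
    aFillGo line i [] '?' = bFillGo line (List.replicate i first) first := by
  induction line with
  | nil => intro i first h; simp [List.find?] at h
  | cons c rest ih =>
      intro i first h
      by_cases hc : c = '?'
      · subst hc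
        rw [List.find?_cons_of_neg (by simp)] at h
        show (if ('?' : Char) ≠ '?' then _ else if ('?' : Char) ≠ '?' then _ else aFillGo rest (i+1) [] '?')
            = bFillGo rest (List.replicate i first ++ [if ('?' : Char) ≠ '?' then '?' else first])
                (if ('?' : Char) ≠ '?' then '?' else first)
        have hqq : ¬ (('?' : Char) ≠ '?') := fun h => h rfl
        rw [if_neg hqq, if_neg hqq, if_neg hqq]
        rw [ih (i + 1) first h, ← List.replicate_succ']
      · rw [List.find?_cons_of_pos (by simpa using hc)] at h
        cases h
        have h1 : ((i : Int) + 1 - ((([] : List Char).length : Nat) : Int)).toNat = i + 1 := by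
          simp only [List.length_nil, Nat.cast_zero]; omega
        show (if c ≠ '?' then
              aFillGo rest (i+1) ([] ++ List.replicate (((i : Int)+1 - (([] : List Char).length : Int)).toNat) c) c
            else _)
            = bFillGo rest (List.replicate i c ++ [if c ≠ '?' then c else c]) (if c ≠ '?' then c else c)
        rw [if_pos hc, if_pos hc, h1, List.nil_append]
        rw [fill_phase2 rest (i + 1) _ c hc (by simp), ← List.replicate_succ']

theorem bFillGo_any (line : List Char) : ∀ (out : List Char) (cur : Char),
    cur ≠ '?' → (line ≠ [] ∨ out.any (· ≠ '?') = true) →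
    (bFillGo line out cur).any (· ≠ '?') = true := by
  induction line with
  | nil =>
      intro out cur _ h
      rcases h with h | h
      · exact absurd rfl h
      · simpa [bFillGo] using h
  | cons c rest ih =>
      intro out cur hcur _
      show (bFillGo rest (out ++ [if c ≠ '?' then c else cur]) _).any _ = true
      have hcur'ne : (if c ≠ '?' then c else cur) ≠ '?' := by
        by_cases hc : c = '?'
        · simpa [hc] using hcur
        · simpa [hc] using hc
      refine ih (out ++ [if c ≠ '?' then c else cur]) _ hcur'ne (Or.inr ?_)
      rw [List.any_append]
      simp only [List.any_cons, List.any_nil, Bool.or_false, Bool.or_eq_true]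
      exact Or.inr (decide_eq_true hcur'ne)

theorem aFill_any (line : List Char) (first : Char) (h : line.find? (· ≠ '?') = some first) :
    (aFillGo line 0 [] '?').any (· ≠ '?') = true := by
  have hf : first ≠ '?' := by simpa using List.find?_some h
  have hne : line ≠ [] := by rintro rfl; simp [List.find?] at h
  rw [fill_pre line 0 first h]
  exact bFillGo_any line (List.replicate 0 first) first hf (Or.inl hne)

theorem find?_of_any (line : List Char) (hk : line.any (· ≠ '?') = true) :
    ∃ f, line.find? (· ≠ '?') = some f := by
  cases hfind : line.find? (· ≠ '?') with
  | some f => exact ⟨f, rfl⟩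
  | none =>
      obtain ⟨x, hx, hxp⟩ := List.any_eq_true.mp hk
      exact absurd hxp (by simpa using List.find?_eq_none.mp hfind x hx)

theorem bFill_of_find (line : List Char) (first : Char) (h : line.find? (· ≠ '?') = some first) :
    bFill line = some (aFillGo line 0 [] '?') := by
  rw [bFill, h]
  show some (bFillGo line [] first) = some (aFillGo line 0 [] '?')
  rw [fill_pre line 0 first h]
  rfl

theorem bFill_of_not_any (line : List Char) (hk : ¬ line.any (· ≠ '?') = true) :
    bFill line = none := by
  rw [bFill, List.find?_eq_none.mpr]
  intro x hx
  by_contra hxne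
  exact hk (List.any_eq_true.mpr ⟨x, hx, by simpa using hxne⟩)

-- After the first known row, A's outer loop is exactly Source B's carry scan.
theorem phaseK (rows : List String) : ∀ (n : Nat) (res : List (List Char)) (last : List Char),
    res.length = n → last.any (· ≠ '?') = true →
    aLoop rows n res last = res ++ bRowsGo (rows.map (fun l => bFill l.toList)) [] last := by
  induction rows with
  | nil => intro n res last _ _; simp [aLoop, bRowsGo]
  | cons line rest ih =>
      intro n res last hlen hlast
      by_cases hk : line.toList.any (· ≠ '?') = true
      · obtain ⟨first, hfind⟩ := find?_of_any line.toList hk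
        have h1 : ((n : Int) + 1 - (res.length : Int)).toNat = 1 := by omega
        rw [aLoop, if_pos hk, h1, List.replicate_one]
        rw [ih (n + 1) _ _ (by simp [hlen]) (aFill_any line.toList first hfind)]
        rw [List.map_cons, bFill_of_find line.toList first hfind]
        simp only [bRowsGo]
        rw [bRowsGo_append _ ([] ++ [aFillGo line.toList 0 [] '?'])]
        simp
      · rw [aLoop, if_neg hk, if_pos hlast]
        rw [ih (n + 1) _ _ (by simp [hlen]) hlast]
        rw [List.map_cons, bFill_of_not_any line.toList hk]
        simp only [bRowsGo]
        rw [bRowsGo_append _ ([] ++ [last])]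
        simp

-- Before any known row A appends nothing, then catches up retroactively at the first known
-- row; that equals B's scan seeded with the first known fill, prefixed by one copy per
-- already-consumed unknown row.
theorem phaseU (rows : List String) : ∀ (n : Nat) (q : List Char), q.any (· ≠ '?') = false →
    aLoop rows n [] q =
      match ((rows.map (fun l => bFill l.toList)).find? Option.isSome).bind id with
      | none => []
      | some fk => List.replicate n fk ++ bRowsGo (rows.map (fun l => bFill l.toList)) [] fk := by
  induction rows with
  | nil => intro n q _; simp [aLoop]
  | cons line rest ih =>
      intro n q hq
      by_cases hk : line.toList.any (· ≠ '?') = true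
      · obtain ⟨first, hfind⟩ := find?_of_any line.toList hk
        have hbf := bFill_of_find line.toList first hfind
        have h1 : ((n : Int) + 1 - ((([] : List (List Char)).length : Nat) : Int)).toNat = n + 1 := by
          simp only [List.length_nil, Nat.cast_zero]; omega
        rw [aLoop, if_pos hk, h1, List.nil_append]
        rw [phaseK rest (n + 1) _ _ (by simp) (aFill_any line.toList first hfind)]
        rw [List.map_cons, hbf, List.find?_cons_of_pos (by rfl)]
        simp only [Option.bind_some, id_eq]
        simp only [bRowsGo]
        rw [bRowsGo_append _ ([] ++ [aFillGo line.toList 0 [] '?'])]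
        simp [List.replicate_succ']
      · have hbf := bFill_of_not_any line.toList hk
        rw [aLoop, if_neg hk, if_neg (by rw [hq]; simp)]
        rw [ih (n + 1) q hq]
        rw [List.map_cons, hbf, List.find?_cons_of_neg (by simp)]
        cases hfk : (((rest.map (fun l => bFill l.toList)).find? Option.isSome).bind id) with
        | none => simp
        | some fk =>
            simp only [bRowsGo]
            rw [bRowsGo_append _ ([] ++ [fk])]
            simp [List.replicate_succ']

theorem any_replicate_q (k : Nat) : (List.replicate k '?').any (· ≠ '?') = false := by
  simp

-- ===== VERDICT (by name: the statement is the Claim_ definition above) =====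
theorem main_func_spec : Claim_equal_main_func := by
  intro cake _
  unfold Spec_main_func main_func main_func_alt
  by_cases hc : cake = []
  · simp [hc]
  · simp only [if_neg hc]
    rw [phaseU cake 0 _ (any_replicate_q _)]
    cases hfk : ((cake.map (fun l => bFill l.toList)).find? Option.isSome).bind id with
    | none =>
        show "\n" ++ PySem.Str.join "\n" (([] : List (List Char)).map String.mk) = "\n"
        decide
    | some fk => simp only [List.replicate_zero, List.nil_append]
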